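-- pv_equiv track=rewrite | github.com/RATHOD-SHUBHAM/DataStructure-And-Algorithm | LeetCode/Problems/Sum problem/2,3,4/4 sum/k_sum_2/k_sum.py | k_sum_count
-- ===== SOURCE A (Python) =====
-- def k_sum_count(group_list):
--     prev_sum_count = {0 : 1}
--
--     # take the first list
--     for cur_lst in group_list:
--         cur_sum_count = {} # keep track of the cur sum for the cur list
--         # add every number to previous sum
--         for num in cur_lst:
--             for prev_sum in prev_sum_count:
--                 cur_sum = num + prev_sum
--
--                 if cur_sum not in cur_sum_count:
--                     cur_sum_count[cur_sum] = 0
--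
--                 # value represent the number of combination that can form the previous sum
--                 # so if we add cur num to prev sum - this is same as adding the cur num to number comination that will form the sum
--                 # eg: if there are 2 number which can produce a sum of 0
--                 # then add 1 to 0 mean there will be 2 number who will give sum 1 when we add the cur number 1
--                 cur_sum_count[cur_sum] += prev_sum_count[prev_sum]
--
--         # once all the combination for cur list is over
--         # copy the new sum
--         prev_sum_count = cur_sum_count
--
--     return prev_sum_count
-- ===== SOURCE B (Python) =====
-- from collections import Counter
--
--
-- def k_sum_count(group_list):
--     # All achievable sums of one pick per list, by recursion on how many
--     # lists are used; then tally them in one pass.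
--     def sums(k):
--         if k == 0:
--             return [0]
--         return [x + s for x in group_list[k - 1] for s in sums(k - 1)]
--
--     return dict(Counter(sums(len(group_list))))
-- ===== Notes on version B (the rewrite author's own statement) =====
-- stated objective: alternative
-- what changed: Replaced the hand-rolled distribution-merging DP (fold over lists with nested dict-update loops) by plain enumeration: recursively build the list of sums of every one-pick-per-list combination and tally it once with a Counter.
import Mathlib
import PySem

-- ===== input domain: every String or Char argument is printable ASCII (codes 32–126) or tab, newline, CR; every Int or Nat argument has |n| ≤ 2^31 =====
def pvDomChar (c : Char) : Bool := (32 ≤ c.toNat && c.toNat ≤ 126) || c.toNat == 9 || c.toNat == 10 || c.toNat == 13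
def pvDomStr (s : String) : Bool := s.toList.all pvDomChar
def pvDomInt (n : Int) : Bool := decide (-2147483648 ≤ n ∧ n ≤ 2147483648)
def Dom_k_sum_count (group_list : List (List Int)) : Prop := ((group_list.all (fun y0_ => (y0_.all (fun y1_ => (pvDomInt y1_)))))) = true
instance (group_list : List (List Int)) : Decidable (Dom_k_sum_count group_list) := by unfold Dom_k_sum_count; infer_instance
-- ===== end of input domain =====

-- B replaces A's incremental sum-distribution DP by plain enumeration: recursively list the sums
-- of every one-pick-per-list combination, then tally them once with a Counter — alternative, same result.


-- ===== PORT A =====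
-- the body of A's outer loop: build cur_sum_count from prev_sum_count and cur_lst
-- ('if cur_sum not in cur: cur[cur_sum]=0; cur[cur_sum]+=prev[prev_sum]' is d.modify key 0 (· + c);
--  'for prev_sum in prev_sum_count' iterates the keys, 'prev_sum_count[prev_sum]' is an always-present
--  lookup, ported as getD _ 0 — exact, the key is in the dict)
def kSumStep (prev : PySem.Dict Int Int) (curLst : List Int) : PySem.Dict Int Int :=
  curLst.foldl (fun cur num =>
    prev.keys.foldl (fun cur prevSum =>
      cur.modify (num + prevSum) 0 (· + prev.getD prevSum 0)) cur)
    PySem.Dict.empty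

def k_sum_count (group_list : List (List Int)) : List (Int × Int) :=
  (group_list.foldl kSumStep ((PySem.Dict.empty : PySem.Dict Int Int).insert 0 1)).items

-- ===== PORT B =====
-- sums(k) = sums of one pick from each of the first k lists
-- ('[x + s for x in group_list[k-1] for s in sums(k-1)]' is flatMap/map; k-1 is in range)
def sumsB (gl : List (List Int)) : Nat → List Int
  | 0 => [0]
  | k + 1 => (gl.getD k []).flatMap (fun x => (sumsB gl k).map (fun s => x + s))

-- dict(Counter(sums(len(group_list))))
def k_sum_count_alt (group_list : List (List Int)) : List (Int × Int) :=
  (PySem.Dict.counter (sumsB group_list group_list.length)).items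

-- ===== PRECONDITION & SPEC =====
def Spec_k_sum_count (group_list : List (List Int)) (out : List (Int × Int)) : Prop := out = k_sum_count_alt group_list
instance (group_list : List (List Int)) (out : List (Int × Int)) : Decidable (Spec_k_sum_count group_list out) := by unfold Spec_k_sum_count; infer_instance

-- ===== CLAIM (what is proved, stated in full; the proofs are below) =====
def Claim_equal_k_sum_count : Prop := ∀ (group_list : List (List Int)), Dom_k_sum_count group_list → Spec_k_sum_count group_list (k_sum_count group_list)

-- ===== LEMMAS AND PROOFS =====

-- A's sum multiset, written as A computes it (left fold distributing each list over the previous sums)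
def sumsA (gl : List (List Int)) : List Int :=
  gl.foldl (fun S l => l.flatMap (fun num => S.map (num + ·))) [0]

theorem getD_foldl_modify_group (ps : List Int) (f : Int → Int) (c : Int → Int)
    (d : PySem.Dict Int Int) (v : Int) :
    (ps.foldl (fun cur p => cur.modify (f p) 0 (· + c p)) d).getD v 0
      = d.getD v 0 + ((ps.filter (fun p => f p == v)).map c).sum := by
  induction ps generalizing d with
  | nil => simp
  | cons p rest ih =>
    simp only [List.foldl_cons, List.filter_cons]
    rw [ih]
    by_cases h : f p = v
    · subst h
      simp only [beq_self_eq_true, if_true, List.map_cons, List.sum_cons]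
      rw [PySem.Dict.getD_modify]
      simp only [if_true]
      ring
    · have : (f p == v) = false := by simp [h]
      rw [this]
      simp only [Bool.false_eq_true, if_false]
      rw [PySem.Dict.getD_modify]
      have : ¬ v = f p := fun hh => h hh.symm
      simp [this]

theorem set_update_map_ofList (t : PySem.Set Int) (f : Int → Int) (S : List Int) :
    PySem.Set.update t ((PySem.Set.ofList S).map f) = PySem.Set.update t (S.map f) := by
  induction S using List.reverseRecOn with
  | nil => rfl
  | append_singleton xs x ih =>
    rw [PySem.Set.ofList_append_singleton, PySem.Set.add_eq_ite]
    by_cases hx : x ∈ PySem.Set.ofList xs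
    · rw [if_pos hx, List.map_append, PySem.Set.update_append, ih]
      have hm : f x ∈ PySem.Set.update t (xs.map f) := by
        rw [PySem.Set.mem_update]; right
        exact List.mem_map_of_mem ((PySem.Set.mem_ofList xs x).mp hx)
      show PySem.Set.update t (xs.map f) = PySem.Set.update (PySem.Set.update t (xs.map f)) [f x]
      rw [show PySem.Set.update (PySem.Set.update t (xs.map f)) [f x]
            = PySem.Set.add (PySem.Set.update t (xs.map f)) (f x) from rfl,
          PySem.Set.add_of_mem hm]
    · rw [if_neg hx, List.map_append, List.map_append, PySem.Set.update_append,
          PySem.Set.update_append, ih]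

theorem filter_count (S : List Int) (num v : Int) :
    ((((PySem.Set.ofList S).filter (fun p => num + p == v)).map (fun p => (S.count p : Int))).sum)
      = (((S.map (num + ·)).count v : Int)) := by
  have hpred : (fun p : Int => num + p == v) = (fun p : Int => p == v - num) := by
    funext p; by_cases h : p = v - num
    · subst h; simp
    · have h2 : ¬ num + p = v := by omega
      simp [h, h2]
  rw [hpred, List.filter_beq]
  by_cases hm : v - num ∈ S
  · have hmem : v - num ∈ PySem.Set.ofList S := (PySem.Set.mem_ofList S _).mpr hm
    have hcount : (PySem.Set.ofList S).count (v - num) = 1 :=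
      List.count_eq_one_of_mem (PySem.Set.nodup_ofList S) hmem
    rw [hcount]
    have hinj : Function.Injective (fun p : Int => num + p) := fun a b h => by
      simpa using h
    have : v = num + (v - num) := by omega
    rw [this, List.count_map_of_injective S _ hinj]
    simp
  · have hnot : v - num ∉ PySem.Set.ofList S := fun h => hm ((PySem.Set.mem_ofList S _).mp h)
    rw [List.count_eq_zero.mpr hnot]
    have : v ∉ S.map (num + ·) := by
      intro h; rcases List.mem_map.mp h with ⟨p, hp, he⟩
      exact hm (by simpa [show p = v - num by omega] using hp)
    rw [List.count_eq_zero.mpr this]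
    simp

theorem inner_fold (S : List Int) (num : Int) (d : PySem.Dict Int Int) (hd : d.keys.Nodup) :
    (PySem.Dict.counter S).keys.foldl
        (fun cur p => cur.modify (num + p) 0 (· + (PySem.Dict.counter S).getD p 0)) d
      = (S.map (num + ·)).foldl (fun cur s => cur.modify s 0 (· + 1)) d := by
  have hL : ((PySem.Dict.counter S).keys.foldl
      (fun cur p => cur.modify (num + p) 0 (· + (PySem.Dict.counter S).getD p 0)) d).keys.Nodup :=
    PySem.Dict.nodup_keys_foldl_modify_key _ (fun p => num + p) 0
      (fun _ p => (· + (PySem.Dict.counter S).getD p 0)) d hd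
  have hR : ((S.map (num + ·)).foldl (fun cur s => cur.modify s 0 (· + 1)) d).keys.Nodup :=
    PySem.Dict.nodup_keys_foldl_modify_key _ (fun s => s) 0 (fun _ _ => (· + 1)) d hd
  have hKL : ((PySem.Dict.counter S).keys.foldl
      (fun cur p => cur.modify (num + p) 0 (· + (PySem.Dict.counter S).getD p 0)) d).keys
      = PySem.Set.update d.keys ((PySem.Dict.counter S).keys.map (fun p => num + p)) :=
    PySem.Dict.keys_foldl_modify_key _ (fun p => num + p) 0
      (fun _ p => (· + (PySem.Dict.counter S).getD p 0)) d
  have hKR : ((S.map (num + ·)).foldl (fun cur s => cur.modify s 0 (· + 1)) d).keys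
      = PySem.Set.update d.keys ((S.map (num + ·)).map (fun s => s)) :=
    PySem.Dict.keys_foldl_modify_key _ (fun s => s) 0 (fun _ _ => (· + 1)) d
  have hkeys : ((PySem.Dict.counter S).keys.foldl
      (fun cur p => cur.modify (num + p) 0 (· + (PySem.Dict.counter S).getD p 0)) d).keys
      = ((S.map (num + ·)).foldl (fun cur s => cur.modify s 0 (· + 1)) d).keys := by
    rw [hKL, hKR, List.map_id', PySem.Dict.keys_counter, set_update_map_ofList]
  apply PySem.Dict.ext
  rw [PySem.Dict.items_eq_map_keys _ hL 0, PySem.Dict.items_eq_map_keys _ hR 0, hkeys]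
  apply List.map_congr_left
  intro k hk
  have hgL : ((PySem.Dict.counter S).keys.foldl
      (fun cur p => cur.modify (num + p) 0 (· + (PySem.Dict.counter S).getD p 0)) d).getD k 0
      = d.getD k 0 + (((S.map (num + ·)).count k : Int)) := by
    rw [getD_foldl_modify_group ((PySem.Dict.counter S).keys) (fun p => num + p)
        (fun p => (PySem.Dict.counter S).getD p 0) d k]
    congr 1
    rw [PySem.Dict.keys_counter]
    rw [show (List.map (fun p => (PySem.Dict.counter S).getD p 0)
          (List.filter (fun p => num + p == k) (PySem.Set.ofList S)))
        = (List.map (fun p => (S.count p : Int))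
          (List.filter (fun p => num + p == k) (PySem.Set.ofList S))) from
      List.map_congr_left (fun p _ => PySem.Dict.getD_counter S p)]
    exact filter_count S num k
  have hgR : ((S.map (num + ·)).foldl (fun cur s => cur.modify s 0 (· + 1)) d).getD k 0
      = d.getD k 0 + (((S.map (num + ·)).count k : Int)) :=
    PySem.Dict.getD_foldl_modify_add_one _ d k
  rw [hgL, hgR]

theorem fold_nums (S : List Int) (l : List Int) (d : PySem.Dict Int Int) (hd : d.keys.Nodup) :
    l.foldl (fun cur num =>
        (PySem.Dict.counter S).keys.foldl
          (fun cur p => cur.modify (num + p) 0 (· + (PySem.Dict.counter S).getD p 0)) cur) d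
      = l.foldl (fun cur num =>
          (S.map (num + ·)).foldl (fun cur s => cur.modify s 0 (· + 1)) cur) d := by
  induction l generalizing d with
  | nil => rfl
  | cons num rest ih =>
    simp only [List.foldl_cons]
    rw [inner_fold S num d hd]
    exact ih _ (PySem.Dict.nodup_keys_foldl_modify_key _ (fun s => s) 0 (fun _ _ => (· + 1)) d hd)

theorem step_counter (l S : List Int) :
    kSumStep (PySem.Dict.counter S) l
      = PySem.Dict.counter (l.flatMap (fun num => S.map (num + ·))) := by
  conv_rhs => rw [PySem.Dict.counter_eq_foldl, List.foldl_flatMap]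
  exact fold_nums S l PySem.Dict.empty (by simp [PySem.Dict.empty, PySem.Dict.keys])

theorem top_fold (gl : List (List Int)) (S : List Int) :
    gl.foldl kSumStep (PySem.Dict.counter S)
      = PySem.Dict.counter (gl.foldl (fun S l => l.flatMap (fun num => S.map (num + ·))) S) := by
  induction gl generalizing S with
  | nil => rfl
  | cons l rest ih =>
    simp only [List.foldl_cons]
    rw [step_counter l S, ih]

theorem sumsB_take (gl : List (List Int)) (k : Nat) (hk : k ≤ gl.length) :
    sumsB gl k = sumsA (gl.take k) := by
  induction k with
  | zero => rfl
  | succ k ih =>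
    have hlt : k < gl.length := hk
    have htake : gl.take (k + 1) = gl.take k ++ [gl[k]] := List.take_succ_eq_append_getElem hlt
    unfold sumsA
    rw [htake, List.foldl_append]
    show (gl.getD k []).flatMap (fun x => (sumsB gl k).map (fun s => x + s))
      = (gl[k]).flatMap (fun num => (sumsA (gl.take k)).map (num + ·))
    rw [ih (Nat.le_of_lt hlt), List.getD_eq_getElem gl [] hlt]

theorem sums_eq (gl : List (List Int)) :
    sumsA gl = sumsB gl gl.length := by
  rw [sumsB_take gl gl.length (le_refl _)]
  simp

theorem k_sum_count_spec : Claim_equal_k_sum_count := by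
  intro gl _
  unfold Spec_k_sum_count k_sum_count k_sum_count_alt
  rw [← sums_eq]
  have h0 : ((PySem.Dict.empty : PySem.Dict Int Int).insert 0 1) = PySem.Dict.counter [0] := by decide
  rw [h0, top_fold]
  rfl
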